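-- pv_equiv track=rewrite | github.com/kyngskwk/solving-problems | other/2021 Kakao blind/01. 아이디 변경.py | solution
-- ===== SOURCE A (Python) =====
-- def solution(new_id):
--     answer = ''
--     ok = ['-', '_', '.']
--     for word in new_id:
--         if word.isalpha():
--             answer += word.lower()
--         elif word.isdigit() or word in ok:
--             if word == '.':
--                 if len(answer) == 0 or answer[-1] == '.':
--                     continue
--                 else:
--                     answer += word
--             else:
--                 answer += word
--
--     if len(answer) > 0 and answer[-1] == '.':
--         answer = answer[:-1]
--
--     if len(answer) == 0:
--         answer += 'a'
--
--     if len(answer) >= 16: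
--         answer = answer[:15]
--         if answer[-1] == '.':
--             answer = answer[:-1]
--
--     elif len(answer) <= 2:
--         while len(answer) < 3:
--             answer += answer[-1]
--
--     return answer
-- ===== SOURCE B (Python) =====
-- def solution(new_id):
--     # pass 1: keep allowed characters, lowercased
--     s = ''.join(c.lower() for c in new_id if c.isalpha() or c.isdigit() or c in '-_.')
--     # pass 2: keep a dot only if the following character is not a dot (sentinel '.'
--     # at the end drops a trailing dot); this collapses each dot-run and rstrips one dot
--     s = ''.join(a for a, b in zip(s, s[1:] + '.') if a != '.' or b != '.')
--     # pass 3: leading dots, emptiness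
--     s = s.lstrip('.') or 'a'
--     # length rules
--     if len(s) >= 16:
--         s = s[:15].rstrip('.')
--     return s + s[-1] * (3 - len(s))
-- ===== Notes on version B (the rewrite author's own statement) =====
-- stated objective: idiomatic
-- what changed: A's single stateful scan (one loop that filters, lowercases, and suppresses leading/doubled dots via the answer built so far) is replaced by independent passes: filter+lowercase, a zip-with-next-character pass that collapses dot runs and drops the trailing dot, an lstrip of leading dots, then arithmetic length fixes (truncate+rstrip, pad by repetition count) instead of A's while loop.
import Mathlib
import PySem

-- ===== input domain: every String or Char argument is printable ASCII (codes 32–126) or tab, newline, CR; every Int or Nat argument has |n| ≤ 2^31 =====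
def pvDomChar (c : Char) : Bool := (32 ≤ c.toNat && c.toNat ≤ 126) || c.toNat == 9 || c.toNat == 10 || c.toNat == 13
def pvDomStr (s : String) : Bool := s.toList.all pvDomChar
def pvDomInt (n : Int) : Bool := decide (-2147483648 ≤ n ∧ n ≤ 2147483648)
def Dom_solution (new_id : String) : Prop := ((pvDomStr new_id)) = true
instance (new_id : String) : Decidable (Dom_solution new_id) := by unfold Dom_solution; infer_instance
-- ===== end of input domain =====

-- B replaces A's single stateful scan by independent passes (filter+lower, a zip-with-next
-- dot-collapse, lstrip, length fixes); same return value, no side effects. Objective: idiomatic.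

-- ===== PORT A =====
def pvOk : List Char := ['-', '_', '.']

def pvALoop (ans : List Char) : List Char → List Char
  | [] => ans
  | w :: rest =>
    if PySem.Chars.isalpha w then pvALoop (ans ++ [PySem.Chars.lowerChar w]) rest
    else if PySem.Chars.isdigit w || w ∈ pvOk then
      (if w = '.' then
        (if ans.length = 0 ∨ ans.getLast? = some '.' then pvALoop ans rest
         else pvALoop (ans ++ [w]) rest)
       else pvALoop (ans ++ [w]) rest)
    else pvALoop ans rest

-- while len(answer) < 3: answer += answer[-1]
def pvPadA (ans : List Char) : List Char :=
  if ans.length < 3 then pvPadA (ans ++ [ans.getLastD 'a']) else ans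
termination_by 3 - ans.length
decreasing_by simp; omega

def solution (new_id : String) : String :=
  let a1 := pvALoop [] new_id.toList
  let a2 := if 0 < a1.length ∧ a1.getLast? = some '.' then a1.dropLast else a1
  let a3 := if a2.length = 0 then a2 ++ ['a'] else a2
  let a4 := if 16 ≤ a3.length then
      (let t := a3.take 15
       if t.getLast? = some '.' then t.dropLast else t)
    else if a3.length ≤ 2 then pvPadA a3 else a3
  String.mk a4

-- ===== PORT B =====
def pvKeep (c : Char) : Bool :=
  PySem.Chars.isalpha c || PySem.Chars.isdigit c || decide (c ∈ ['-', '_', '.'])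
  -- `c in '-_.'` is membership of a single char in that string: exact as list membership

-- hand port of s.rstrip('.'): removes every trailing '.' (exact)
def pvRstripDots (s : List Char) : List Char := (s.reverse.dropWhile (· = '.')).reverse

def solution_alt (new_id : String) : String :=
  let s1 := (new_id.toList.filter pvKeep).map PySem.Chars.lowerChar
  -- zip(s, s[1:] + '.'): s[1:] on a list is drop 1 (exact for start index 1)
  let s2 := ((s1.zip (s1.drop 1 ++ ['.'])).filter
               (fun p => decide (p.1 ≠ '.' ∨ p.2 ≠ '.'))).map Prod.fst
  -- s.lstrip('.') (hand port, exact) then `or 'a'`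
  let t := s2.dropWhile (· = '.')
  let s3 := if t = [] then ['a'] else t
  let s4 := if 16 ≤ s3.length then pvRstripDots (s3.take 15) else s3
  String.mk (s4 ++ List.replicate (3 - s4.length) (s4.getLastD 'a'))

-- ===== PRECONDITION & SPEC =====
def Spec_solution (new_id : String) (out : String) : Prop := out = solution_alt new_id
instance (new_id : String) (out : String) : Decidable (Spec_solution new_id out) := by
  unfold Spec_solution; infer_instance

-- ===== CLAIM (what is proved, stated in full; the proofs are below) =====
def Claim_equal_solution : Prop := ∀ (new_id : String), Dom_solution new_id → Spec_solution new_id (solution new_id)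

-- ===== LEMMAS AND PROOFS =====

-- canonical form of A's scan: `b` = "answer is empty or ends with a dot"
def pvClean (b : Bool) : List Char → List Char
  | [] => []
  | c :: r => if c = '.' then (if b then pvClean true r else '.' :: pvClean true r)
              else c :: pvClean false r

-- strip one trailing dot
def pvStrip1 (u : List Char) : List Char := if u.getLast? = some '.' then u.dropLast else u

def pvNoDD (u : List Char) : Prop := List.IsChain (fun x y => ¬(x = '.' ∧ y = '.')) u

lemma pv_lower_ne_dot (c : Char) (h : PySem.Chars.isalpha c = true) :
    PySem.Chars.lowerChar c ≠ '.' := by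
  cases hu : PySem.Chars.isupper c
  · have hl : PySem.Chars.islower c = true := by
      cases hli : PySem.Chars.islower c
      · exfalso; unfold PySem.Chars.isalpha at h; rw [hu, hli] at h; simp at h
      · rfl
    have hle : ('a' : Char) ≤ c := by
      simp only [PySem.Chars.islower, Bool.and_eq_true, decide_eq_true_eq] at hl
      exact hl.1
    have hc : PySem.Chars.lowerChar c = c := by unfold PySem.Chars.lowerChar; rw [hu]; simp
    rw [hc]
    intro he
    rw [he] at hle
    exact absurd hle (by decide)
  · have hc : PySem.Chars.lowerChar c = Char.ofNat (c.toNat + 32) := by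
      unfold PySem.Chars.lowerChar; rw [hu]; simp
    rw [hc]
    simp only [PySem.Chars.isupper, Bool.and_eq_true, decide_eq_true_eq, Char.le_def] at hu
    have h65 : 65 ≤ c.toNat := by
      have := hu.1; change (65 : UInt32) ≤ c.val at this
      simp [UInt32.le_iff_toNat_le] at this; exact this
    have h90 : c.toNat ≤ 90 := by
      have := hu.2; change c.val ≤ (90 : UInt32) at this
      simp [UInt32.le_iff_toNat_le] at this; exact this
    intro he
    have h1 := congrArg Char.toNat he
    rw [Char.toNat_ofNat] at h1
    rw [if_pos (by left; omega)] at h1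
    have h2 : ('.' : Char).toNat = 46 := rfl
    omega

lemma pv_lower_id (c : Char) (h : PySem.Chars.isalpha c = false) :
    PySem.Chars.lowerChar c = c := by
  unfold PySem.Chars.isalpha at h
  simp only [Bool.or_eq_false_iff] at h
  simp [PySem.Chars.lowerChar, h.1]

lemma pv_clean_cons_ne (b : Bool) (c : Char) (r : List Char) (h : c ≠ '.') :
    pvClean b (c :: r) = c :: pvClean false r := by
  simp [pvClean, h]

lemma pv_clean_false_ne_nil (c : Char) (r : List Char) : pvClean false (c :: r) ≠ [] := by
  by_cases h : c = '.' <;> simp [pvClean, h]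

lemma pv_clean_true_head (s : List Char) :
    pvClean true s = [] ∨ ∃ c r, pvClean true s = c :: r ∧ c ≠ '.' := by
  induction s with
  | nil => left; rfl
  | cons c r ih =>
    by_cases h : c = '.'
    · subst h; simpa [pvClean] using ih
    · right; exact ⟨c, pvClean false r, by simp [pvClean, h], h⟩

lemma pv_dropWhile_clean_true (s : List Char) :
    (pvClean true s).dropWhile (· = '.') = pvClean true s := by
  rcases pv_clean_true_head s with h | ⟨c, r, h, hc⟩ <;> rw [h]
  · rfl
  · rw [List.dropWhile_cons_of_neg (by simpa using hc)]

lemma pv_dropWhile_clean_false (s : List Char) :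
    (pvClean false s).dropWhile (· = '.') = pvClean true s := by
  cases s with
  | nil => rfl
  | cons c r =>
    by_cases h : c = '.'
    · subst h
      have h1 : pvClean false ('.' :: r) = '.' :: pvClean true r := by simp [pvClean]
      have h2 : pvClean true ('.' :: r) = pvClean true r := by simp [pvClean]
      rw [h1, h2, List.dropWhile_cons_of_pos (by simp), pv_dropWhile_clean_true]
    · rw [pv_clean_cons_ne _ _ _ h, pv_clean_cons_ne _ _ _ h,
        List.dropWhile_cons_of_neg (by simpa using h)]

lemma pv_strip1_cons (a : Char) (u : List Char) (h : u ≠ []) :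
    pvStrip1 (a :: u) = a :: pvStrip1 u := by
  unfold pvStrip1
  have h1 : (a :: u).getLast? = u.getLast? := by
    rcases List.exists_cons_of_ne_nil h with ⟨b, t, rfl⟩
    simp [List.getLast?_cons]
  rw [h1, List.dropLast_cons_of_ne_nil h]
  split <;> rfl

lemma pv_flag_append (ans : List Char) (x : Char) :
    decide ((ans ++ [x]).length = 0 ∨ (ans ++ [x]).getLast? = some '.') = decide (x = '.') := by
  simp

lemma pv_aloop_clean (l ans : List Char) :
    pvALoop ans l =
      ans ++ pvClean (decide (ans.length = 0 ∨ ans.getLast? = some '.'))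
        ((l.filter pvKeep).map PySem.Chars.lowerChar) := by
  induction l generalizing ans with
  | nil => simp [pvALoop, pvClean]
  | cons c r ih =>
    rw [pvALoop]
    by_cases ha : PySem.Chars.isalpha c
    · rw [if_pos ha]
      have hk : pvKeep c = true := by simp [pvKeep, ha]
      have hx := pv_lower_ne_dot c ha
      rw [ih]
      simp only [List.filter_cons, hk, if_true, List.map_cons]
      rw [pv_clean_cons_ne _ _ _ hx, pv_flag_append]
      simp [decide_eq_false hx, List.append_assoc]
    · rw [if_neg ha]
      have hid := pv_lower_id c (by simpa using ha)
      by_cases hd : PySem.Chars.isdigit c || c ∈ pvOk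
      · rw [if_pos hd]
        have hk : pvKeep c = true := by
          simp only [pvKeep, pvOk] at *
          rcases Bool.or_eq_true_iff.mp hd with h | h
          · simp [h]
          · simp only [decide_eq_true_eq] at h
            simp [h]
        by_cases hdot : c = '.'
        · subst hdot
          rw [if_pos rfl]
          by_cases hcond : ans.length = 0 ∨ ans.getLast? = some '.'
          · rw [if_pos hcond, ih]
            simp only [List.filter_cons, hk, if_true, List.map_cons, hid,
              decide_eq_true hcond]
            simp [pvClean]
          · rw [if_neg hcond, ih]
            simp only [List.filter_cons, hk, if_true, List.map_cons, hid, pv_flag_append,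
              decide_eq_false hcond]
            simp [pvClean, List.append_assoc]
        · rw [if_neg hdot, ih]
          simp only [List.filter_cons, hk, if_true, List.map_cons, hid, pv_flag_append]
          rw [pv_clean_cons_ne _ _ _ hdot]
          simp [decide_eq_false hdot, List.append_assoc]
      · rw [if_neg (by simpa using hd)]
        have hk : pvKeep c = false := by
          simp only [Bool.or_eq_true_iff] at hd
          push Not at hd
          simp only [pvKeep, pvOk] at *
          simp only [Bool.or_eq_false_iff]
          exact ⟨⟨by simpa using ha, by simpa using hd.1⟩, by simpa using hd.2⟩
        rw [ih]
        simp [hk]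

lemma pv_collapse_eq (s : List Char) :
    ((s.zip (s.drop 1 ++ ['.'])).filter
        (fun p => decide (p.1 ≠ '.' ∨ p.2 ≠ '.'))).map Prod.fst
      = pvStrip1 (pvClean false s) := by
  induction s with
  | nil => rfl
  | cons a r ih =>
    cases r with
    | nil =>
      by_cases h : a = '.'
      · subst h; rfl
      · simp [pvClean, pvStrip1, h]
    | cons b r' =>
      have hzip : ((a :: b :: r').zip (((a :: b :: r').drop 1) ++ ['.'])) =
          (a, b) :: ((b :: r').zip (((b :: r').drop 1) ++ ['.'])) := by simp
      rw [hzip, List.filter_cons]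
      by_cases h : a = '.'
      · subst h
        by_cases hb : b = '.'
        · subst hb
          simp only [ne_eq, not_true_eq_false, or_self, decide_false, Bool.false_eq_true,
            if_false]
          rw [ih]
          have h1 : pvClean false ('.' :: '.' :: r') = '.' :: pvClean true r' := by
            simp [pvClean]
          have h2 : pvClean false ('.' :: r') = '.' :: pvClean true r' := by
            simp [pvClean]
          rw [h1, h2]
        · have hcond : decide ((('.', b).1 ≠ '.') ∨ (('.', b).2 ≠ '.')) = true := by
            simp [hb]
          rw [hcond, if_pos rfl, List.map_cons, ih]
          have h1 : pvClean false ('.' :: b :: r') = '.' :: b :: pvClean false r' := by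
            simp [pvClean, hb]
          have h2 : pvClean false (b :: r') = b :: pvClean false r' := by
            simp [pvClean, hb]
          rw [h1, h2, pv_strip1_cons '.' (b :: pvClean false r') (by simp)]
      · have hcond : decide (((a, b).1 ≠ '.') ∨ ((a, b).2 ≠ '.')) = true := by simp [h]
        rw [hcond, if_pos rfl, List.map_cons, ih]
        rw [pv_clean_cons_ne _ _ _ h,
          pv_strip1_cons _ _ (pv_clean_false_ne_nil b r')]

lemma pv_dropWhile_strip1_comm (t : List Char) :
    (pvStrip1 t).dropWhile (· = '.') = pvStrip1 (t.dropWhile (· = '.')) := by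
  induction t with
  | nil => rfl
  | cons c r ih =>
    by_cases h : c = '.'
    · subst h
      rw [List.dropWhile_cons_of_pos (by simp)]
      cases r with
      | nil => rfl
      | cons b r2 =>
        rw [pv_strip1_cons '.' (b :: r2) (by simp),
          List.dropWhile_cons_of_pos (by simp), ih]
    · cases r with
      | nil => simp [pvStrip1, h]
      | cons b r2 =>
        rw [pv_strip1_cons c (b :: r2) (by simp),
          List.dropWhile_cons_of_neg (by simpa using h),
          List.dropWhile_cons_of_neg (by simpa using h),
          pv_strip1_cons c (b :: r2) (by simp)]

lemma pv_clean_noDD (b : Bool) (s : List Char) : pvNoDD (pvClean b s) := by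
  induction s generalizing b with
  | nil => simp [pvClean, pvNoDD]
  | cons c r ih =>
    by_cases h : c = '.'
    · subst h
      cases b with
      | true => simpa [pvClean] using ih true
      | false =>
        have h1 : pvClean false ('.' :: r) = '.' :: pvClean true r := by simp [pvClean]
        rw [pvNoDD, h1]
        refine List.IsChain.cons (ih true) ?_
        intro y hy
        rcases pv_clean_true_head r with he | ⟨c2, r2, he, hc2⟩ <;> rw [he] at hy
        · simp at hy
        · simp only [List.head?_cons, Option.mem_def, Option.some.injEq] at hy
          subst hy
          exact fun hp => hc2 hp.2
    · rw [pvNoDD, pv_clean_cons_ne _ _ _ h]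
      refine List.IsChain.cons (ih false) ?_
      intro y hy
      exact fun hp => h hp.1

lemma pv_noDD_take (u : List Char) (n : Nat) (h : pvNoDD u) : pvNoDD (u.take n) :=
  List.IsChain.take h n

lemma pv_noDD_strip1 (u : List Char) (h : pvNoDD u) : pvNoDD (pvStrip1 u) := by
  unfold pvStrip1
  split
  · exact List.IsChain.dropLast h
  · exact h

lemma pv_rstrip_eq_strip1 (v : List Char) (h : pvNoDD v) : pvRstripDots v = pvStrip1 v := by
  rcases List.eq_nil_or_concat v with rfl | ⟨w, a, rfl⟩
  · rfl
  · unfold pvRstripDots pvStrip1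
    rw [List.concat_eq_append] at *
    by_cases ha : a = '.'
    · subst ha
      rw [List.reverse_concat, List.dropWhile_cons_of_pos (by simp)]
      rw [if_pos (by simp)]
      rw [List.dropLast_concat]
      have hw : w.reverse.dropWhile (· = '.') = w.reverse := by
        rw [List.dropWhile_eq_self_iff]
        intro hx0 hx
        simp only [decide_eq_true_eq] at hx
        have hh : w.getLast? = some (w.reverse[0]) := by
          rw [← List.head?_reverse]
          exact List.head?_eq_getElem?.trans (List.getElem?_eq_getElem hx0)
        have hch := (List.isChain_append.mp h).2.2
        exact hch _ hh '.' (by simp) ⟨hx, rfl⟩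
      rw [hw, List.reverse_reverse]
    · rw [List.reverse_concat, List.dropWhile_cons_of_neg (by simpa using ha)]
      rw [if_neg (by simp [ha])]
      rw [← List.reverse_concat, List.reverse_reverse]

lemma pv_strip1_length (v : List Char) : v.length - 1 ≤ (pvStrip1 v).length := by
  unfold pvStrip1; split <;> simp

lemma pv_pad_eq (u : List Char) (h : u ≠ []) :
    pvPadA u = u ++ List.replicate (3 - u.length) (u.getLastD 'a') := by
  match u, h with
  | [x], _ =>
    rw [pvPadA]; simp only [List.length_cons, List.length_nil]
    rw [if_pos (by omega)]
    rw [pvPadA]; simp only [List.getLastD, List.cons_append, List.nil_append,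
      List.length_cons, List.length_nil]
    rw [if_pos (by omega)]
    rw [pvPadA]
    simp
  | [x, y], _ =>
    rw [pvPadA]; simp only [List.length_cons, List.length_nil]
    rw [if_pos (by omega)]
    rw [pvPadA]
    simp
  | x :: y :: z :: t, _ =>
    rw [pvPadA]
    have hl : (x :: y :: z :: t).length = t.length + 3 := by simp
    rw [if_neg (by omega)]
    have : 3 - (x :: y :: z :: t).length = 0 := by omega
    rw [this]
    simp

lemma pv_final (u : List Char) (hne : u ≠ []) (hnd : pvNoDD u) :
    (if 16 ≤ u.length then
       (let t := u.take 15
        if t.getLast? = some '.' then t.dropLast else t)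
     else if u.length ≤ 2 then pvPadA u else u)
    = (if 16 ≤ u.length then pvRstripDots (u.take 15) else u) ++
        List.replicate
          (3 - (if 16 ≤ u.length then pvRstripDots (u.take 15) else u).length)
          ((if 16 ≤ u.length then pvRstripDots (u.take 15) else u).getLastD 'a') := by
  by_cases h16 : 16 ≤ u.length
  · simp only [if_pos h16]
    have hr : pvRstripDots (u.take 15) = pvStrip1 (u.take 15) :=
      pv_rstrip_eq_strip1 _ (pv_noDD_take u 15 hnd)
    have hlen : (u.take 15).length = 15 := by simp; omega
    have hlen2 : 14 ≤ (pvStrip1 (u.take 15)).length := by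
      have := pv_strip1_length (u.take 15); omega
    have hz : 3 - (pvRstripDots (u.take 15)).length = 0 := by rw [hr]; omega
    rw [hz]
    show pvStrip1 (u.take 15) = _
    rw [hr]
    simp
  · simp only [if_neg h16]
    by_cases h2 : u.length ≤ 2
    · simp only [if_pos h2]
      exact pv_pad_eq u hne
    · simp only [if_neg h2]
      have hz : 3 - u.length = 0 := by omega
      rw [hz]
      simp

-- ===== VERDICT (by name: the statement is the Claim_ definition above) =====
theorem solution_spec : Claim_equal_solution := by
  unfold Claim_equal_solution Spec_solution
  intro new_id _
  unfold solution solution_alt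
  dsimp only
  set l := new_id.toList with hl
  set s1 := (l.filter pvKeep).map PySem.Chars.lowerChar with hs1
  -- A's scan in canonical form
  have ha1 : pvALoop [] l = pvClean true s1 := by
    rw [pv_aloop_clean]; rfl
  -- A's strip of one trailing dot is pvStrip1
  have ha2 : (if 0 < (pvALoop [] l).length ∧ (pvALoop [] l).getLast? = some '.'
        then (pvALoop [] l).dropLast else pvALoop [] l) = pvStrip1 (pvClean true s1) := by
    rw [ha1]
    unfold pvStrip1
    by_cases hc : (pvClean true s1).getLast? = some '.'
    · rw [if_pos hc, if_pos ⟨by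
        rcases List.eq_nil_or_concat (pvClean true s1) with he | ⟨w, a, he⟩
        · rw [he] at hc; simp at hc
        · rw [he]; simp, hc⟩]
    · rw [if_neg hc, if_neg (fun hp => hc hp.2)]
  -- B's collapse+lstrip equals the same thing
  have hb : (((s1.zip (s1.drop 1 ++ ['.'])).filter
        (fun p => decide (p.1 ≠ '.' ∨ p.2 ≠ '.'))).map Prod.fst).dropWhile (· = '.')
        = pvStrip1 (pvClean true s1) := by
    rw [pv_collapse_eq, pv_dropWhile_strip1_comm, pv_dropWhile_clean_false]
  rw [ha2, hb]
  -- the common value after the empty check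
  set v := pvStrip1 (pvClean true s1) with hv
  have hstep : (if v.length = 0 then v ++ ['a'] else v) = (if v = [] then ['a'] else v) := by
    by_cases he : v = []
    · rw [if_pos (by simp [he]), if_pos he, he]; rfl
    · rw [if_neg (by simpa using he), if_neg he]
  rw [hstep]
  set u := if v = [] then ['a'] else v with hu
  have hne : u ≠ [] := by
    rw [hu]; split
    · simp
    · assumption
  have hnd : pvNoDD u := by
    rw [hu]; split
    · simp [pvNoDD]
    · exact pv_noDD_strip1 _ (pv_clean_noDD true s1)
  exact congrArg String.mk (pv_final u hne hnd)
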